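-- pv_equiv track=rewrite | github.com/h-y-e-j-i/algorithm-study | programmers/graph1-2.py | BFS
-- ===== SOURCE A (Python) =====
-- def BFS(graph, start_node, n):
--     visited = list()
--     queue = list()
--     node_count = list()
--
--
--     final_node_count = 0
--
--     queue.append(start_node)
--     node_count.append(1)
--
--     while queue or len(visited)<n:
--         node = queue.pop(0)
--         node_count[0] -= 1
--         add_node_count = 0
--
--         if node not in visited:
--             visited.append(node)
--             # if node == end_node:
--             #     return count
--             if node not in graph:
--                 pass
--             else :
--                 for i in graph[node] :
--                     if i not in queue and i not in visited:
--                         queue.append(i)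
--                         add_node_count += 1
--
--             if len(node_count) <= 1:
--                 node_count.append(add_node_count)
--             else:
--                 node_count[1] += (add_node_count)
--
--         if not queue:
--             return final_node_count
--
--         if node_count[0] == 0 :
--             #node_count.append(len(graph[node]))
--             final_node_count = node_count[1]
--             node_count.pop(0)
--
--             #count += 1
--
--     return final_node_count
-- ===== SOURCE B (Python) =====
-- def BFS(graph, start_node, n):
--     # Level-by-level BFS with a visited set marked at discovery; returns the size of
--     # the last BFS level beyond the start (0 when nothing new is reachable), like A.
--     visited = {start_node}
--     level = [start_node]
--     last = 0
--     while True: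
--         nxt = []
--         for node in level:
--             for i in graph.get(node, []):
--                 if i not in visited:
--                     visited.add(i)
--                     nxt.append(i)
--         if not nxt:
--             return last
--         last = len(nxt)
--         level = nxt
-- ===== Notes on version B (the rewrite author's own statement) =====
-- stated objective: alternative
-- what changed: A runs a single queue with list.pop(0), membership scans over the visited list and the queue, and a node_count bookkeeping list to detect level boundaries; B restructures it as level-by-level BFS with a visited set marked at discovery time, so the node_count bookkeeping and the in-queue scans disappear and the level size is just len(next_level).
import Mathlib
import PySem

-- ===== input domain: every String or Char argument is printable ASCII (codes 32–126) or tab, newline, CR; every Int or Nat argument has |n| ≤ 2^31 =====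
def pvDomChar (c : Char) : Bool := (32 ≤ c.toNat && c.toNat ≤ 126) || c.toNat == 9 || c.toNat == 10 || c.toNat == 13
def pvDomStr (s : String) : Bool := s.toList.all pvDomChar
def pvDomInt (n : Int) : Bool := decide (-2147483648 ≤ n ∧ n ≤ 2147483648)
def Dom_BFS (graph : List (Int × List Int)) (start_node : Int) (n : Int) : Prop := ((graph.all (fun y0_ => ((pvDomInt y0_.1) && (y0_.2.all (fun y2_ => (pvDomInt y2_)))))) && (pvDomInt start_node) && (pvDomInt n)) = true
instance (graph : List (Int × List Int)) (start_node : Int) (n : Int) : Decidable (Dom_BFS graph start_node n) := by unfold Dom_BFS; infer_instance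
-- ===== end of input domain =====

-- B replaces A's single queue with list.pop(0), its membership scans and its node_count
-- bookkeeping list by level-by-level BFS with a visited set marked at discovery,
-- returning the size of the last level; objective: alternative structure.


-- ===== PORT A =====
-- `for i in graph[node]: if i not in queue and i not in visited: queue.append(i); add_node_count += 1`
def pvNeigh (visited : List Int) (adj : List Int) (q : List Int) (add : Int) : List Int × Int :=
  match adj with
  | [] => (q, add)
  | i :: rest =>
    if i ∉ q ∧ i ∉ visited then pvNeigh visited rest (q ++ [i]) (add + 1)
    else pvNeigh visited rest q add

-- `node_count[0] -= 1` (on the Python list that is always nonempty; `[]` arm unreachable)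
def pvDecHead (nc : List Int) : List Int :=
  match nc with
  | [] => []
  | c0 :: tl => (c0 - 1) :: tl

-- `if len(node_count) <= 1: node_count.append(add)  else: node_count[1] += add`
def pvPushNc (nc : List Int) (add : Int) : List Int :=
  match nc with
  | [] => [add]
  | [c0] => [c0, add]
  | c0 :: c1 :: tl => c0 :: (c1 + add) :: tl

-- termination measure for A's while loop (proof device only, not part of the algorithm)
def pvSumDeg (graph : List (Int × List Int)) (visited : List Int) : Nat :=
  ((graph.filter (fun p => decide (p.1 ∉ visited))).map (fun p => p.2.length + 1)).sum

theorem pvNeigh_fst_len (v : List Int) : ∀ (adj q : List Int) (a : Int),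
    ((pvNeigh v adj q a).1).length ≤ q.length + adj.length := by
  intro adj
  induction adj with
  | nil => intro q a; simp [pvNeigh]
  | cons i rest ih =>
    intro q a
    simp only [pvNeigh]
    split
    · have := ih (q ++ [i]) (a + 1); simp at this ⊢; omega
    · have := ih q a; simp at this ⊢; omega

theorem pvSumDeg_cons (p : Int × List Int) (rest : List (Int × List Int)) (v : List Int) :
    pvSumDeg (p :: rest) v = (if p.1 ∈ v then 0 else p.2.length + 1) + pvSumDeg rest v := by
  by_cases h : p.1 ∈ v <;> simp [pvSumDeg, h]

theorem pvSumDeg_mono (g : List (Int × List Int)) (v v' : List Int)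
    (h : ∀ y ∈ v, y ∈ v') : pvSumDeg g v' ≤ pvSumDeg g v := by
  induction g with
  | nil => simp [pvSumDeg]
  | cons p rest ih =>
    rw [pvSumDeg_cons, pvSumDeg_cons]
    split_ifs with h1 h2 h2
    · omega
    · omega
    · exact absurd (h _ h2) h1
    · omega

theorem pvSumDeg_hit (g : List (Int × List Int)) (x : Int) (adj : List Int)
    (v v' : List Int) (hx : (PySem.Dict.mk g).get? x = some adj) (hxv : x ∉ v)
    (hsub : ∀ y ∈ v, y ∈ v') (hxv' : x ∈ v') :
    pvSumDeg g v' + (adj.length + 1) ≤ pvSumDeg g v := by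
  induction g with
  | nil => simp [PySem.Dict.get?] at hx
  | cons p rest ih =>
    rw [PySem.Dict.get?_mk_cons] at hx
    rw [pvSumDeg_cons, pvSumDeg_cons]
    by_cases hpx : p.1 = x
    · subst hpx
      simp at hx
      subst hx
      have hmono := pvSumDeg_mono rest v v' hsub
      simp [hxv, hxv']
      omega
    · have hbeq : (p.1 == x) = false := by simp [hpx]
      rw [hbeq] at hx; simp at hx
      have := ih hx
      split_ifs with h1 h2 h2
      · omega
      · omega
      · exact absurd (hsub _ h2) h1
      · omega

-- the while loop of A; the loop tail is written once per branch so the termination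
-- argument sees each branch's state.  The `queue = []` arm is the `while` exit
-- (Python could raise there only when len(visited) < n, a state BFS never reaches);
-- the `[]` node_count arms mirror Python states that would raise IndexError and are
-- likewise unreachable from BFS's initial state.
def loopA (graph : List (Int × List Int)) (visited queue ncount : List Int)
    (final : Int) : Int :=
  match queue with
  | [] => final
  | node :: qrest =>
    -- node_count[0] -= 1
    let nc1 : List Int := pvDecHead ncount
    if hv : node ∈ visited then
      if qrest = [] then final
      else
        match nc1 with
        | [] => final
        | c0 :: tl =>
          if c0 = 0 then
            match tl with
            | [] => final
            | c1 :: _ => loopA graph visited qrest tl c1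
          else loopA graph visited qrest (c0 :: tl) final
    else
      match hg : (PySem.Dict.mk graph).get? node with
      | none =>
        if qrest = [] then final
        else
          match pvPushNc nc1 0 with
          | [] => final
          | c0 :: tl =>
            if c0 = 0 then
              match tl with
              | [] => final
              | c1 :: _ => loopA graph (visited ++ [node]) qrest tl c1
            else loopA graph (visited ++ [node]) qrest (c0 :: tl) final
      | some adj =>
        if hq : (pvNeigh (visited ++ [node]) adj qrest 0).1 = [] then final
        else
          match pvPushNc nc1 (pvNeigh (visited ++ [node]) adj qrest 0).2 with
          | [] => final
          | c0 :: tl =>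
            if c0 = 0 then
              match tl with
              | [] => final
              | c1 :: _ => loopA graph (visited ++ [node]) (pvNeigh (visited ++ [node]) adj qrest 0).1 tl c1
            else loopA graph (visited ++ [node]) (pvNeigh (visited ++ [node]) adj qrest 0).1 (c0 :: tl) final
termination_by queue.length + pvSumDeg graph visited
decreasing_by
  all_goals simp
  all_goals first
    | (have := pvSumDeg_mono graph visited (visited ++ [node]) (by intro y hy; simp [hy]);
       omega)
    | (have h1 := pvNeigh_fst_len (visited ++ [node]) adj qrest 0;
       have h2 := pvSumDeg_hit graph node adj visited (visited ++ [node]) hg hv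
         (by intro y hy; simp [hy]) (by simp);
       omega)

def BFS (graph : List (Int × List Int)) (start_node : Int) (n : Int) : Int :=
  loopA graph [] [start_node] [1] 0

-- ===== PORT B =====
-- `for i in graph.get(node, []): if i not in visited: visited.add(i); nxt.append(i)`
def pvInner (visited : PySem.Set Int) (nxt : List Int) (adj : List Int) :
    PySem.Set Int × List Int :=
  match adj with
  | [] => (visited, nxt)
  | i :: rest =>
    if i ∈ visited then pvInner visited nxt rest
    else pvInner (PySem.Set.add visited i) (nxt ++ [i]) rest

-- `for node in level: <inner loop>`
def pvLevel (graph : List (Int × List Int)) (visited : PySem.Set Int)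
    (nxt : List Int) (level : List Int) : PySem.Set Int × List Int :=
  match level with
  | [] => (visited, nxt)
  | node :: rest =>
    let p := pvInner visited nxt ((PySem.Dict.mk graph).getD node [])
    pvLevel graph p.1 p.2 rest

-- `while True:` of B; fuel only makes the recursion structural — it exceeds the
-- possible number of levels (proved adequate by the lemmas below)
def loopB (graph : List (Int × List Int)) (fuel : Nat) (visited : PySem.Set Int)
    (level : List Int) (last : Int) : Int :=
  match fuel with
  | 0 => last
  | fuel + 1 =>
    let p := pvLevel graph visited [] level
    if p.2 = [] then last
    else loopB graph fuel p.1 p.2 (p.2.length : Int)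

def BFS_alt (graph : List (Int × List Int)) (start_node : Int) (n : Int) : Int :=
  loopB graph (graph.length + (graph.map (fun p => p.2.length)).sum + 2)
    (PySem.Set.ofList [start_node]) [start_node] 0

-- ===== PRECONDITION & SPEC =====
def Spec_BFS (graph : List (Int × List Int)) (start_node : Int) (n : Int) (out : Int) : Prop := out = BFS_alt graph start_node n
instance (graph : List (Int × List Int)) (start_node : Int) (n : Int) (out : Int) : Decidable (Spec_BFS graph start_node n out) := by unfold Spec_BFS; infer_instance

-- ===== CLAIM (what is proved, stated in full; the proofs are below) =====
def Claim_equal_BFS : Prop := ∀ (graph : List (Int × List Int)) (start_node : Int) (n : Int), Dom_BFS graph start_node n → Spec_BFS graph start_node n (BFS graph start_node n)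

-- ===== LEMMAS AND PROOFS =====

theorem corr_inner (vA R : List Int) : ∀ (adj S acc : List Int) (add : Int),
    (∀ i : Int, i ∈ S ↔ i ∈ vA ∨ i ∈ R ∨ i ∈ acc) →
    ∃ new : List Int,
      pvInner S acc adj = (S ++ new, acc ++ new) ∧
      pvNeigh vA adj (R ++ acc) add = (R ++ (acc ++ new), add + (new.length : Int)) ∧
      (∀ i ∈ new, i ∉ S) ∧ new.Nodup := by
  intro adj
  induction adj with
  | nil => intro S acc add _; exact ⟨[], by simp [pvInner], by simp [pvNeigh], by simp, List.nodup_nil⟩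
  | cons i rest ih =>
    intro S acc add hS
    by_cases hi : i ∈ S
    · have hcond : ¬(i ∉ R ++ acc ∧ i ∉ vA) := by
        rcases (hS i).mp hi with h | h | h
        · exact fun hc => hc.2 h
        · exact fun hc => hc.1 (List.mem_append.mpr (Or.inl h))
        · exact fun hc => hc.1 (List.mem_append.mpr (Or.inr h))
      obtain ⟨new, h1, h2, h3, h4⟩ := ih S acc add hS
      refine ⟨new, by simpa [pvInner, hi] using h1, ?_, h3, h4⟩
      rw [pvNeigh, if_neg hcond]
      exact h2
    · have hcond : i ∉ R ++ acc ∧ i ∉ vA := by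
        constructor
        · intro hc
          rcases List.mem_append.mp hc with h | h
          · exact hi ((hS i).mpr (Or.inr (Or.inl h)))
          · exact hi ((hS i).mpr (Or.inr (Or.inr h)))
        · intro hc; exact hi ((hS i).mpr (Or.inl hc))
      have hS' : ∀ j : Int, j ∈ S ++ [i] ↔ j ∈ vA ∨ j ∈ R ∨ j ∈ acc ++ [i] := by
        intro j
        constructor
        · intro hj
          rcases List.mem_append.mp hj with hj | hj
          · rcases (hS j).mp hj with h | h | h
            · exact Or.inl h
            · exact Or.inr (Or.inl h)
            · exact Or.inr (Or.inr (by simp [h]))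
          · exact Or.inr (Or.inr (by simp at hj; simp [hj]))
        · intro hj
          rcases hj with h | h | h
          · exact List.mem_append.mpr (Or.inl ((hS j).mpr (Or.inl h)))
          · exact List.mem_append.mpr (Or.inl ((hS j).mpr (Or.inr (Or.inl h))))
          · rcases List.mem_append.mp h with h | h
            · exact List.mem_append.mpr (Or.inl ((hS j).mpr (Or.inr (Or.inr h))))
            · exact List.mem_append.mpr (Or.inr h)
      obtain ⟨new, h1, h2, h3, h4⟩ := ih (S ++ [i]) (acc ++ [i]) (add + 1) hS'
      refine ⟨i :: new, ?_, ?_, ?_, ?_⟩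
      · rw [pvInner]
        simp only [if_neg hi, PySem.Set.add_of_not_mem hi, h1]
        simp
      · rw [pvNeigh]
        simp only [if_pos hcond]
        rw [show R ++ acc ++ [i] = R ++ (acc ++ [i]) by simp, h2]
        simp only [Prod.mk.injEq]
        refine ⟨by simp, ?_⟩
        simp only [List.length_cons]
        push_cast
        ring
      · intro j hj
        rcases List.mem_cons.mp hj with rfl | hj
        · exact hi
        · intro hjS; exact h3 j hj (by simp [hjS])
      · refine List.nodup_cons.mpr ⟨fun hin => h3 i hin (by simp), h4⟩

theorem pvInner_spec : ∀ (adj S acc : List Int),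
    ∃ new : List Int, pvInner S acc adj = (S ++ new, acc ++ new) ∧
      (∀ i ∈ new, i ∉ S) ∧ new.Nodup := by
  intro adj
  induction adj with
  | nil => intro S acc; exact ⟨[], by simp [pvInner], by simp, List.nodup_nil⟩
  | cons i rest ih =>
    intro S acc
    by_cases hi : i ∈ S
    · obtain ⟨new, h1, h2, h3⟩ := ih S acc
      exact ⟨new, by simpa [pvInner, hi] using h1, h2, h3⟩
    · obtain ⟨new, h1, h2, h3⟩ := ih (S ++ [i]) (acc ++ [i])
      refine ⟨i :: new, ?_, ?_, ?_⟩
      · rw [pvInner]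
        simp only [if_neg hi, PySem.Set.add_of_not_mem hi, h1]
        simp
      · intro j hj
        rcases List.mem_cons.mp hj with rfl | hj
        · exact hi
        · intro hjS; exact h2 j hj (by simp [hjS])
      · refine List.nodup_cons.mpr ⟨fun hin => h2 i hin (by simp), h3⟩

theorem pvLevel_spec (graph : List (Int × List Int)) : ∀ (level S acc : List Int),
    ∃ new : List Int, pvLevel graph S acc level = (S ++ new, acc ++ new) ∧
      (∀ i ∈ new, i ∉ S) ∧ new.Nodup := by
  intro level
  induction level with
  | nil => intro S acc; exact ⟨[], by simp [pvLevel], by simp, List.nodup_nil⟩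
  | cons node rest ih =>
    intro S acc
    obtain ⟨n1, e1, p1, q1⟩ := pvInner_spec ((PySem.Dict.mk graph).getD node []) S acc
    obtain ⟨n2, e2, p2, q2⟩ := ih (S ++ n1) (acc ++ n1)
    refine ⟨n1 ++ n2, ?_, ?_, ?_⟩
    · simp [pvLevel, e1, e2, List.append_assoc]
    · intro j hj
      rcases List.mem_append.mp hj with hj | hj
      · exact p1 j hj
      · intro hjS; exact p2 j hj (by simp [hjS])
    · refine List.nodup_append.mpr ⟨q1, q2, ?_⟩
      exact fun a ha b hb heq => p2 b hb (by simp [heq ▸ ha])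

theorem pvLevel_dead (graph : List (Int × List Int)) : ∀ (level S acc : List Int),
    (∀ x ∈ level, (PySem.Dict.mk graph).get? x = none) →
    pvLevel graph S acc level = (S, acc) := by
  intro level
  induction level with
  | nil => intro S acc _; simp [pvLevel]
  | cons node rest ih =>
    intro S acc h
    rw [pvLevel]
    have hd : (PySem.Dict.mk graph).getD node [] = [] := by
      rw [PySem.Dict.getD_eq_get?_getD, h node (by simp)]
      rfl
    rw [hd]
    exact ih S acc (fun x hx => h x (by simp [hx]))

theorem corr_level (graph : List (Int × List Int)) :
    ∀ (rem prev done nxt nc : List Int) (final : Int),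
    rem ≠ [] →
    (nc = [(rem.length : Int), (nxt.length : Int)] ∨ (nc = [(rem.length : Int)] ∧ nxt = [])) →
    (rem ++ nxt).Nodup →
    (∀ x ∈ rem ++ nxt, x ∉ prev ++ done) →
    loopA graph (prev ++ done) (rem ++ nxt) nc final =
      (if (pvLevel graph (prev ++ done ++ rem ++ nxt) nxt rem).2 = [] then final
       else loopA graph (prev ++ done ++ rem)
              (pvLevel graph (prev ++ done ++ rem ++ nxt) nxt rem).2
              [((pvLevel graph (prev ++ done ++ rem ++ nxt) nxt rem).2.length : Int)]
              ((pvLevel graph (prev ++ done ++ rem ++ nxt) nxt rem).2.length : Int)) := by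
  intro rem
  induction rem with
  | nil => intro _ _ _ _ _ hne _ _ _; exact absurd rfl hne
  | cons node rest ih =>
    intro prev done nxt nc final _ hnc h1 hx
    have hnode : node ∉ prev ++ done := hx node (by simp)
    have hno : node ∉ rest ++ nxt := (List.nodup_cons.mp (by simpa using h1)).1
    have h1' : (rest ++ nxt).Nodup := (List.nodup_cons.mp (by simpa using h1)).2
    have hx' : ∀ x ∈ rest ++ nxt, x ∉ prev ++ (done ++ [node]) := by
      intro x hxm hmem
      have hxpd : x ∉ prev ++ done := hx x (by
        rcases List.mem_append.mp hxm with h | h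
        · simp [h]
        · simp [h])
      simp only [List.mem_append] at hmem hxpd
      rcases hmem with h | h | h
      · exact hxpd (Or.inl h)
      · exact hxpd (Or.inr h)
      · simp at h; subst h; exact hno hxm
    have key : ∀ X : Int,
        pvPushNc (pvDecHead nc) X =
          [(rest.length : Int), (nxt.length : Int) + X] := by
      intro X
      rcases hnc with h | ⟨h, h2⟩
      · subst h
        simp [pvDecHead, pvPushNc]
        try push_cast
        try ring
      · subst h; subst h2
        simp [pvDecHead, pvPushNc]
        try push_cast
        try ring
    rw [List.cons_append, loopA.eq_def, pvLevel]
    simp only [dif_neg hnode, key]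
    split
    next hg =>
      have hgd : (PySem.Dict.mk graph).getD node [] = [] := by
        rw [PySem.Dict.getD_eq_get?_getD, hg]; rfl
      rw [hgd]
      simp only [pvInner]
      by_cases hq : rest ++ nxt = []
      · have hr : rest = [] := by
          rcases List.append_eq_nil_iff.mp hq with ⟨h, _⟩; exact h
        have hn : nxt = [] := by
          rcases List.append_eq_nil_iff.mp hq with ⟨_, h⟩; exact h
        subst hr; subst hn
        simp [pvLevel]
      · simp only [if_neg hq]
        by_cases hr : rest = []
        · subst hr
          have hn : nxt ≠ [] := by simpa using hq
          simp [pvLevel, hn]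
        · have hc0 : ((rest.length : Int)) ≠ 0 := by
            simpa using fun h => hr (List.length_eq_zero_iff.mp h)
          simp only [if_neg hc0, add_zero]
          have hx'A : ∀ x ∈ rest ++ nxt, x ∉ prev ++ done ++ [node] := by
            intro x hm
            simpa [List.append_assoc] using hx' x hm
          rw [ih (prev ++ done) [node] nxt _ final hr (Or.inl rfl) h1' hx'A]
          simp [List.append_assoc]
    next adj hg =>
      have hgd : (PySem.Dict.mk graph).getD node [] = adj := by
        rw [PySem.Dict.getD_eq_get?_getD, hg]; rfl
      rw [hgd]
      have hSmem : ∀ i : Int, i ∈ prev ++ done ++ node :: rest ++ nxt ↔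
          i ∈ prev ++ done ++ [node] ∨ i ∈ rest ∨ i ∈ nxt := by
        intro i; simp; tauto
      obtain ⟨new, hB, hA, hnewS, hnewN⟩ :=
        corr_inner (prev ++ done ++ [node]) rest adj (prev ++ done ++ node :: rest ++ nxt) nxt 0 hSmem
      rw [hA, hB]
      have hlen : (nxt.length : Int) + (0 + (new.length : Int)) = ((nxt ++ new).length : Int) := by
        push_cast [List.length_append]; ring
      rw [hlen]
      have h1'' : (rest ++ (nxt ++ new)).Nodup := by
        rw [show rest ++ (nxt ++ new) = (rest ++ nxt) ++ new by simp]
        refine List.nodup_append.mpr ⟨h1', hnewN, ?_⟩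
        intro a ha b hb heq
        refine hnewS b hb ?_
        rw [← heq]
        rcases List.mem_append.mp ha with h | h <;> simp [h]
      have hx'' : ∀ x ∈ rest ++ (nxt ++ new), x ∉ prev ++ (done ++ [node]) := by
        intro x hxm hmem
        rcases List.mem_append.mp hxm with h | h
        · exact hx' x (by simp [h]) hmem
        · rcases List.mem_append.mp h with h | h
          · exact hx' x (by simp [h]) hmem
          · refine hnewS x h ?_
            simp only [List.mem_append, List.mem_cons, List.mem_singleton] at hmem ⊢
            tauto
      by_cases hq : rest ++ (nxt ++ new) = []
      · have hr : rest = [] := by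
          rcases List.append_eq_nil_iff.mp hq with ⟨h, _⟩; exact h
        have hn : nxt = [] := by
          rcases List.append_eq_nil_iff.mp hq with ⟨_, h⟩
          rcases List.append_eq_nil_iff.mp h with ⟨h', _⟩; exact h'
        have hw : new = [] := by
          rcases List.append_eq_nil_iff.mp hq with ⟨_, h⟩
          rcases List.append_eq_nil_iff.mp h with ⟨_, h'⟩; exact h'
        subst hr; subst hn; subst hw
        simp [pvLevel, hq]
      · simp only [dif_neg hq, if_neg hq]
        by_cases hr : rest = []
        · subst hr
          have hn : nxt ++ new ≠ [] := by simpa using hq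
          simp [pvLevel, hn]
        · have hc0 : ((rest.length : Int)) ≠ 0 := by
            simpa using fun h => hr (List.length_eq_zero_iff.mp h)
          simp only [if_neg hc0]
          have hx''A : ∀ x ∈ rest ++ (nxt ++ new), x ∉ prev ++ done ++ [node] := by
            intro x hm
            simpa [List.append_assoc] using hx'' x hm
          rw [ih (prev ++ done) [node] (nxt ++ new) _ final hr (Or.inl rfl) h1'' hx''A]
          simp [List.append_assoc]

theorem pvSumDeg_le (g : List (Int × List Int)) (v : List Int) :
    pvSumDeg g v ≤ g.length + (g.map (fun p => p.2.length)).sum := by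
  induction g with
  | nil => simp [pvSumDeg]
  | cons p rest ih =>
    rw [pvSumDeg_cons]
    split_ifs <;> simp <;> omega

theorem corr_levels (graph : List (Int × List Int)) :
    ∀ (fuel : Nat) (prev level : List Int) (last : Int),
    level ≠ [] → level.Nodup → (∀ x ∈ level, x ∉ prev) →
    pvSumDeg graph (prev ++ level) + 2 ≤ fuel →
    loopA graph prev level [(level.length : Int)] last =
      loopB graph fuel (prev ++ level) level last := by
  intro fuel
  induction fuel with
  | zero => intro prev level last _ _ _ hf; omega
  | succ f ihf =>
    intro prev level last hne hnd hpv hf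
    obtain ⟨new, hL, hnewS, hnewN⟩ := pvLevel_spec graph level (prev ++ level) []
    simp only [List.nil_append] at hL
    have hcl := corr_level graph level prev [] [] [(level.length : Int)] last hne
      (Or.inr ⟨rfl, rfl⟩) (by simpa using hnd) (by simpa using hpv)
    simp only [List.append_nil] at hcl
    rw [hL] at hcl
    simp only at hcl
    rw [hcl, loopB]
    simp only [hL]
    by_cases hnew : new = []
    · simp [hnew]
    · simp only [if_neg hnew]
      have hpv' : ∀ x ∈ new, x ∉ prev ++ level := fun x hx => hnewS x hx
      by_cases hkey : ∀ k ∈ new, (PySem.Dict.mk graph).get? k = none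
      · have hclD := corr_level graph new (prev ++ level) [] [] [(new.length : Int)]
          ((new.length : Int)) hnew (Or.inr ⟨rfl, rfl⟩) (by simpa using hnewN)
          (by simpa using hpv')
        simp only [List.append_nil] at hclD
        rw [pvLevel_dead graph new (prev ++ level ++ new) [] hkey] at hclD
        simp only [if_pos] at hclD
        rw [hclD]
        obtain ⟨f', rfl⟩ : ∃ f', f = f' + 1 := ⟨f - 1, by omega⟩
        rw [loopB]
        rw [pvLevel_dead graph new (prev ++ level ++ new) [] hkey]
        simp
      · push_neg at hkey
        obtain ⟨k, hkmem, hkne⟩ := hkey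
        obtain ⟨adj, hadj⟩ := Option.ne_none_iff_exists'.mp hkne
        have hdec := pvSumDeg_hit graph k adj (prev ++ level) (prev ++ level ++ new) hadj
          (fun h => hnewS k hkmem h) (by intro y hy; simp at hy ⊢; tauto) (by simp [hkmem])
        exact ihf (prev ++ level) new ((new.length : Int)) hnew hnewN hpv' (by omega)

-- ===== VERDICT (by name: the statement is the Claim_ definition above) =====
theorem BFS_spec : Claim_equal_BFS := by
  unfold Claim_equal_BFS Spec_BFS
  intro graph s n _
  unfold BFS BFS_alt
  have h := corr_levels graph (graph.length + (graph.map (fun p => p.2.length)).sum + 2)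
    [] [s] 0 (by simp) (by simp) (by simp) (by have := pvSumDeg_le graph [s]; simp; omega)
  simpa [PySem.Set.ofList, PySem.Set.add] using h
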